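-- pv_equiv track=rewrite | github.com/enver1323/sailab_aki | aki_backend/src/app/domain/patient/schemas/patient_record_schema.py | _default_daily_data_formatter
-- ===== SOURCE A (Python) =====
-- from typing import List, Dict, Tuple, Optional
--
-- def _default_daily_data_formatter(
--
--         day: int,
--         slot: int,
--         columns: List[str],
--         data: dict,
--         top_explanations: Dict[str, Dict[str, str]],
--         slot_data: dict,
--         **kwargs,
-- ):
--     for col in columns:
--         value = data.get(f"d{day}_{slot}_{col}", None)
--         has_lrp = any(
--             bool(top_explanations.get(str(day), {}).get(f"{prefix}_{col}"))
--             for prefix in ("d1_1", "d1_2", "d1_3", "d2_1", "d2_2", "d2_3")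
--         )
--
--         slot_data[col] = value
--         slot_data[f"{col}_lrp"] = value if has_lrp else None
--
--     return slot_data
-- ===== SOURCE B (Python) =====
-- _LRP_PREFIXES = ("d1_1", "d1_2", "d1_3", "d2_1", "d2_2", "d2_3")
--
--
-- def _default_daily_data_formatter(
--         day,
--         slot,
--         columns,
--         data,
--         top_explanations,
--         slot_data,
--         **kwargs,
-- ):
--     # Build the set of columns flagged by LRP once, instead of re-probing the
--     # day's explanation dict six times per column.
--     day_exp = top_explanations.get(str(day), {})
--     lrp_cols = {
--         k[5:]
--         for k in day_exp
--         if k[4:5] == "_" and k[:4] in _LRP_PREFIXES and day_exp[k]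
--     }
--     key_base = f"d{day}_{slot}_"
--     for col in columns:
--         value = data.get(key_base + col, None)
--         slot_data[col] = value
--         slot_data[col + "_lrp"] = value if col in lrp_cols else None
--     return slot_data
-- ===== Notes on version B (the rewrite author's own statement) =====
-- stated objective: faster
-- what changed: Instead of re-probing the day's explanation dict with six prefixed keys for every column, B fetches the day's dict once, makes a single pass over its keys to build a set of LRP-flagged columns, and then does one set lookup per column.
import Mathlib
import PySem

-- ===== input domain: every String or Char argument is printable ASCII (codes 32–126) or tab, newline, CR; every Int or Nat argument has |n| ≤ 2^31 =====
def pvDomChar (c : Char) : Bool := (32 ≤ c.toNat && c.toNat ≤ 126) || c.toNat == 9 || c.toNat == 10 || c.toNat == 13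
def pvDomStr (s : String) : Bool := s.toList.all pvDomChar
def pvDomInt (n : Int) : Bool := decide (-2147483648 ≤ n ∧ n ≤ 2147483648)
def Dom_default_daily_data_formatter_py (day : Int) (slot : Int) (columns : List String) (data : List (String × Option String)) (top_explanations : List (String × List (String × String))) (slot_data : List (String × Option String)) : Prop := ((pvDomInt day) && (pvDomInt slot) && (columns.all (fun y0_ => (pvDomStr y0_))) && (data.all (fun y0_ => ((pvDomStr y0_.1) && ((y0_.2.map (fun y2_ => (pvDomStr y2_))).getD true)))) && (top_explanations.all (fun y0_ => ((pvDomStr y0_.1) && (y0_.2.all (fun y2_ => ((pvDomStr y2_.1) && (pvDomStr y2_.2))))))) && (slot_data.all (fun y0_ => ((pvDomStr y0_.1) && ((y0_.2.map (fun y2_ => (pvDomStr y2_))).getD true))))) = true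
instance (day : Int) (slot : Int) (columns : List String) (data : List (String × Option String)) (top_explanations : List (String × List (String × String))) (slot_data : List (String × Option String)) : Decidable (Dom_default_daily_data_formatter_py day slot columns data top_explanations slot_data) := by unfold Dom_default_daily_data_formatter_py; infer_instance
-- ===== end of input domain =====

-- ===== PORT A =====
-- Port of A (faithful to Source A). NOTE: the Python mutates slot_data in place and
-- returns it; the equivalence proved here is about the RETURN value (B mutates it
-- the same way). bool(day_exp.get(key)) is ported as (get? …).getD "" != "".
def pyLrpPrefixes : List String := ["d1_1", "d1_2", "d1_3", "d2_1", "d2_2", "d2_3"]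

def default_daily_data_formatter_py (day : Int) (slot : Int) (columns : List String) (data : List (String × Option String)) (top_explanations : List (String × List (String × String))) (slot_data : List (String × Option String)) : List (String × Option String) :=
  (columns.foldl (fun (sd : PySem.Dict String (Option String)) col =>
      let value : Option String :=
        PySem.Dict.getD (PySem.Dict.mk data)
          ("d" ++ PySem.Int.toStr day ++ "_" ++ PySem.Int.toStr slot ++ "_" ++ col) none
      let has_lrp : Bool := pyLrpPrefixes.any (fun pfx =>
        ((PySem.Dict.get?
            (PySem.Dict.mk (PySem.Dict.getD (PySem.Dict.mk top_explanations) (PySem.Int.toStr day) []))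
            (pfx ++ "_" ++ col)).getD "") != "")
      let sd := PySem.Dict.insert sd col value
      PySem.Dict.insert sd (col ++ "_lrp") (if has_lrp then value else none))
    (PySem.Dict.mk slot_data)).items

-- ===== PORT B =====
-- Port of B (Source B): one pass over the day's explanation dict builds the set of
-- LRP-flagged columns; the per-column 6-prefix re-scan disappears.
-- day_exp[k] (k drawn from day_exp's keys, never raising) is ported as getD k "".
def default_daily_data_formatter_py_alt (day : Int) (slot : Int) (columns : List String) (data : List (String × Option String)) (top_explanations : List (String × List (String × String))) (slot_data : List (String × Option String)) : List (String × Option String) :=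
  let day_exp : PySem.Dict String String :=
    PySem.Dict.mk (PySem.Dict.getD (PySem.Dict.mk top_explanations) (PySem.Int.toStr day) [])
  let lrp_cols : PySem.Set String :=
    (PySem.Dict.keys day_exp).foldl (fun s k =>
      if (PySem.Str.slice k (some 4) (some 5) == "_"
          && pyLrpPrefixes.contains (PySem.Str.slice k none (some 4))
          && (PySem.Dict.getD day_exp k "" != "")) then
        PySem.Set.add s (PySem.Str.slice k (some 5) none)
      else s) PySem.Set.empty
  let key_base : String := "d" ++ PySem.Int.toStr day ++ "_" ++ PySem.Int.toStr slot ++ "_"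
  (columns.foldl (fun (sd : PySem.Dict String (Option String)) col =>
      let value : Option String := PySem.Dict.getD (PySem.Dict.mk data) (key_base ++ col) none
      let sd := PySem.Dict.insert sd col value
      PySem.Dict.insert sd (col ++ "_lrp") (if PySem.Set.contains lrp_cols col then value else none))
    (PySem.Dict.mk slot_data)).items

-- ===== PRECONDITION & SPEC =====
def Spec_default_daily_data_formatter_py (day : Int) (slot : Int) (columns : List String) (data : List (String × Option String)) (top_explanations : List (String × List (String × String))) (slot_data : List (String × Option String)) (out : List (String × Option String)) : Prop := out = default_daily_data_formatter_py_alt day slot columns data top_explanations slot_data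
instance (day : Int) (slot : Int) (columns : List String) (data : List (String × Option String)) (top_explanations : List (String × List (String × String))) (slot_data : List (String × Option String)) (out : List (String × Option String)) : Decidable (Spec_default_daily_data_formatter_py day slot columns data top_explanations slot_data out) := by unfold Spec_default_daily_data_formatter_py; infer_instance

-- ===== CLAIM (what is proved, stated in full; the proofs are below) =====
def Claim_equal_default_daily_data_formatter_py : Prop := ∀ (day : Int) (slot : Int) (columns : List String) (data : List (String × Option String)) (top_explanations : List (String × List (String × String))) (slot_data : List (String × Option String)), Dom_default_daily_data_formatter_py day slot columns data top_explanations slot_data → Spec_default_daily_data_formatter_py day slot columns data top_explanations slot_data (default_daily_data_formatter_py day slot columns data top_explanations slot_data)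

-- ===== LEMMAS AND PROOFS =====

-- Membership in B's lrp_cols set, unfolded to a statement about the keys list.
theorem mem_lrpCols (dexp : PySem.Dict String String) (col : String) :
    col ∈ (PySem.Dict.keys dexp).foldl (fun s k =>
      if (PySem.Str.slice k (some 4) (some 5) == "_"
          && pyLrpPrefixes.contains (PySem.Str.slice k none (some 4))
          && (PySem.Dict.getD dexp k "" != "")) then
        PySem.Set.add s (PySem.Str.slice k (some 5) none)
      else s) PySem.Set.empty
    ↔ ∃ k ∈ PySem.Dict.keys dexp,
        (PySem.Str.slice k (some 4) (some 5) == "_"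
          && pyLrpPrefixes.contains (PySem.Str.slice k none (some 4))
          && (PySem.Dict.getD dexp k "" != "")) = true
        ∧ PySem.Str.slice k (some 5) none = col := by
  rw [PySem.List.foldl_if_eq_foldl_filter, ← PySem.Set.update_map_eq_foldl_add,
      PySem.Set.mem_update]
  simp only [PySem.Set.empty, List.not_mem_nil, false_or, List.mem_map, List.mem_filter]
  constructor
  · rintro ⟨k, ⟨hk, hc⟩, hf⟩; exact ⟨k, hk, hc, hf⟩
  · rintro ⟨k, hk, hc, hf⟩; exact ⟨k, ⟨hk, hc⟩, hf⟩

-- The slices of a key of the shape p ++ "_" ++ col, for p of length 4.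
theorem slices_of_concat (p col : String) (hp : p.toList.length = 4) :
    PySem.Str.slice (p ++ "_" ++ col) (some 4) (some 5) = "_"
    ∧ PySem.Str.slice (p ++ "_" ++ col) none (some 4) = p
    ∧ PySem.Str.slice (p ++ "_" ++ col) (some 5) none = col := by
  have hp5 : (p.toList ++ ['_']).length = 5 := by simp [hp]
  refine ⟨?_, ?_, ?_⟩ <;>
  · apply String.toList_inj.mp
    rw [PySem.Str.toList_slice, PySem.Chars.slice_eq_listSlice]
    first
      | rw [show ((4 : Int)) = ((4 : Nat) : Int) by norm_num,
            show ((5 : Int)) = ((5 : Nat) : Int) by norm_num,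
            PySem.List.slice_natCast]
      | rw [show ((4 : Int)) = ((4 : Nat) : Int) by norm_num, PySem.List.slice_to_natCast]
      | rw [show ((5 : Int)) = ((5 : Nat) : Int) by norm_num, PySem.List.slice_from_natCast]
    rw [String.toList_append, String.toList_append,
        show ("_".toList : List Char) = ['_'] from rfl]
    first
      | rw [List.append_assoc, List.drop_left' hp]
        rfl
      | rw [List.append_assoc, List.take_left' hp]
      | rw [List.drop_left' hp5]

-- A key whose [4:5] slice is "_" is (its own [:4]) ++ "_" ++ (its own [5:]).
theorem concat_of_slices (k : String)
    (h : PySem.Str.slice k (some 4) (some 5) = "_") :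
    k = PySem.Str.slice k none (some 4) ++ "_" ++ PySem.Str.slice k (some 5) none := by
  apply String.toList_inj.mp
  have h' := congrArg String.toList h
  rw [PySem.Str.toList_slice, PySem.Chars.slice_eq_listSlice,
      show ((4 : Int)) = ((4 : Nat) : Int) by norm_num,
      show ((5 : Int)) = ((5 : Nat) : Int) by norm_num,
      PySem.List.slice_natCast] at h'
  have h'' : List.take 1 (List.drop 4 k.toList) = ['_'] := by simpa using h'
  rw [String.toList_append, String.toList_append,
      PySem.Str.toList_slice, PySem.Str.toList_slice,
      PySem.Chars.slice_eq_listSlice, PySem.Chars.slice_eq_listSlice,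
      show ((4 : Int)) = ((4 : Nat) : Int) by norm_num,
      show ((5 : Int)) = ((5 : Nat) : Int) by norm_num,
      PySem.List.slice_to_natCast, PySem.List.slice_from_natCast,
      show ("_".toList : List Char) = ['_'] from rfl,
      ← h'',
      show List.drop 5 k.toList = List.drop 1 (List.drop 4 k.toList) by rw [List.drop_drop],
      List.append_assoc, List.take_append_drop, List.take_append_drop]

-- The per-column LRP test: A's 6-prefix scan equals membership in B's set.
theorem lrp_agree (dexp : List (String × String)) (col : String) :
    (pyLrpPrefixes.any (fun pfx =>
      ((PySem.Dict.get? (PySem.Dict.mk dexp) (pfx ++ "_" ++ col)).getD "") != ""))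
    = PySem.Set.contains
        ((PySem.Dict.keys (PySem.Dict.mk dexp)).foldl (fun s k =>
          if (PySem.Str.slice k (some 4) (some 5) == "_"
              && pyLrpPrefixes.contains (PySem.Str.slice k none (some 4))
              && (PySem.Dict.getD (PySem.Dict.mk dexp) k "" != "")) then
            PySem.Set.add s (PySem.Str.slice k (some 5) none)
          else s) PySem.Set.empty) col := by
  rw [Bool.eq_iff_iff, PySem.Set.contains_iff, mem_lrpCols, List.any_eq_true]
  constructor
  · rintro ⟨p, hp, htruthy⟩
    refine ⟨p ++ "_" ++ col, ?_, ?_⟩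
    · by_contra hnm
      rw [← PySem.Dict.get?_eq_none_iff_not_mem_keys] at hnm
      simp [hnm] at htruthy
    · have hlen : p.toList.length = 4 := by
        fin_cases hp <;> decide
      obtain ⟨h1, h2, h3⟩ := slices_of_concat p col hlen
      refine ⟨?_, h3⟩
      simp only [Bool.and_eq_true, beq_iff_eq, bne_iff_ne, ne_eq]
      refine ⟨⟨h1, by rw [h2]; simpa using hp⟩, ?_⟩
      rw [PySem.Dict.getD_eq_get?_getD]
      simpa using htruthy
  · rintro ⟨k, hk, hc, h5⟩
    simp only [Bool.and_eq_true, beq_iff_eq, bne_iff_ne, ne_eq] at hc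
    obtain ⟨⟨h45, hpref⟩, htruthy⟩ := hc
    refine ⟨PySem.Str.slice k none (some 4), by simpa using hpref, ?_⟩
    have hk' := concat_of_slices k h45
    rw [h5] at hk'
    rw [← hk']
    rw [PySem.Dict.getD_eq_get?_getD] at htruthy
    simpa using htruthy

-- ===== VERDICT (by name: the statement is the Claim_ definition above) =====
theorem default_daily_data_formatter_py_spec : Claim_equal_default_daily_data_formatter_py := by
  intro day slot columns data top_explanations slot_data _
  unfold Spec_default_daily_data_formatter_py
  unfold default_daily_data_formatter_py default_daily_data_formatter_py_alt
  simp only []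
  congr 1
  apply PySem.List.foldl_congr_mem
  intro acc col _
  rw [lrp_agree]
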